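-- pv_equiv track=rewrite | github.com/onewns/TIL | algorithm/Simulation/BOJ_1713.py | solution
-- ===== SOURCE A (Python) =====
-- def solution(limit, recommend):
--     pictures = {}
--     for i in range(len(recommend)):
--         if recommend[i] in pictures:
--             pictures[recommend[i]][0] += 1
--             continue
--         elif len(pictures) == limit:
--             cnt = 1001
--             order = 1001
--             temp = 0
--             for person, data in pictures.items():
--                 if data[0] < cnt or (data[0] == cnt and data[1] < order):
--                     cnt, order, temp = data[0], data[1], person
--             del pictures[temp]
--         pictures[recommend[i]] = [1, i]
--     answer = list(pictures.keys())
--     answer.sort()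
--     return answer
-- ===== SOURCE B (Python) =====
-- def _bisect(frame, item):
--     # insertion point of item in the sorted list frame (leftmost index with frame[j] >= item)
--     lo, hi = 0, len(frame)
--     while lo < hi:
--         mid = (lo + hi) // 2
--         if frame[mid] < item:
--             lo = mid + 1
--         else:
--             hi = mid
--     return lo
--
--
-- def solution(limit, recommend):
--     # frame: list of (count, order, name) kept sorted ascending, so the eviction
--     # victim (lowest count, oldest order) is always frame[0]; updates locate their
--     # position by binary search.  index: name -> (count, order).
--     frame = []
--     index = {}
--     for i, x in enumerate(recommend):
--         if x in index:
--             c, o = index[x]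
--             del frame[_bisect(frame, (c, o, x))]
--             item = (c + 1, o, x)
--             frame.insert(_bisect(frame, item), item)
--             index[x] = (c + 1, o)
--         else:
--             if len(frame) == limit:
--                 _, _, victim = frame[0]
--                 del frame[0]
--                 del index[victim]
--             item = (1, i, x)
--             frame.insert(_bisect(frame, item), item)
--             index[x] = (1, i)
--     return sorted(index)
-- ===== Notes on version B (the rewrite author's own statement) =====
-- stated objective: faster
-- what changed: A re-scans the whole dict for the (count, order)-minimal entry at every eviction; B keeps the frame as a list of (count, order, name) triples maintained in sorted order, locating every update position by binary search, so the eviction victim is always the head of the list.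
import Mathlib
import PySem

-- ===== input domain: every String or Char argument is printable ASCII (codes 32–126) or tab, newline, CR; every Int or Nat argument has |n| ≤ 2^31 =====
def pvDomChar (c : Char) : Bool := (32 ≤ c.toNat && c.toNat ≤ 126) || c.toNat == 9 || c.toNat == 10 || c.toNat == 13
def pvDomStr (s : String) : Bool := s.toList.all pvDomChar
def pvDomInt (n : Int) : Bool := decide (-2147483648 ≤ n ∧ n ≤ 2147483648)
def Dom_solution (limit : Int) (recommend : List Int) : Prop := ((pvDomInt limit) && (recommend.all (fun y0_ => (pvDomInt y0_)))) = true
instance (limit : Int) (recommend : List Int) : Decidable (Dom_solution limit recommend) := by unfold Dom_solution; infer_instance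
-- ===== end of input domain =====

-- B keeps the photo frame as a list of (count, order, name) triples maintained in sorted
-- order (binary search locates every update; the eviction victim is the head) instead of
-- A's full scan of the dict on every eviction (objective: faster).

-- ===== PORT A =====
-- Python's value lists [count, order] (always exactly two ints) are ported as pairs (count, order).
-- The eviction scan `for person, data in pictures.items(): …` folding the running (cnt, order, temp):
def aScan (items : List (Int × (Int × Int))) : Int × Int × Int :=
  items.foldl
    (fun acc pd =>
      if pd.2.1 < acc.1 ∨ (pd.2.1 = acc.1 ∧ pd.2.2 < acc.2.1) then (pd.2.1, pd.2.2, pd.1)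
      else acc)
    (1001, 1001, 0)

-- one iteration of A's loop body, p = (i, recommend[i]); `del pictures[temp]` is Dict.erase
-- (Python raises KeyError when temp is absent — those inputs are excluded by Pre_solution).
def aStep (limit : Int) (d : PySem.Dict Int (Int × Int)) (p : Int × Int) :
    PySem.Dict Int (Int × Int) :=
  match d.get? p.2 with
  | some co => d.insert p.2 (co.1 + 1, co.2)
  | none =>
      let d1 := if (d.size : Int) = limit then d.erase (aScan d.items).2.2 else d
      d1.insert p.2 (1, p.1)

-- `for i in range(len(recommend)): … recommend[i] …` ported as a fold over the (index, value)
-- pairs (every index is in range, so recommend[i] is exactly the enumerated value).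
def solution (limit : Int) (recommend : List Int) : List Int :=
  let pictures := (PySem.List.enumerate recommend).foldl (aStep limit) PySem.Dict.empty
  PySem.List.sorted pictures.keys (fun k => k)

-- ===== PORT B =====
-- Python tuple comparison (count, order, name) < (count', order', name'): lexicographic.
def tripLt (a b : Int × Int × Int) : Bool :=
  a.1 < b.1 || (a.1 == b.1 && (a.2.1 < b.2.1 || (a.2.1 == b.2.1 && a.2.2 < b.2.2)))

-- _bisect: the while loop ported as recursion on hi - lo (mid = (lo + hi) // 2 is
-- inlined at its two use sites); frame[mid] via pyGetD (0 <= mid < len(frame) always).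
def bisectGo (frame : List (Int × Int × Int)) (item : Int × Int × Int) (lo hi : Int) : Int :=
  if h : lo < hi then
    if tripLt (PySem.List.pyGetD frame (PySem.Int.floordiv (lo + hi) 2) (0, 0, 0)) item then
      bisectGo frame item (PySem.Int.floordiv (lo + hi) 2 + 1) hi
    else
      bisectGo frame item lo (PySem.Int.floordiv (lo + hi) 2)
  else lo
termination_by (hi - lo).toNat
decreasing_by
  · have hb := PySem.Int.floordiv_two_mid_bounds (le_of_lt h)
    omega
  · have hlt : PySem.Int.floordiv (lo + hi) 2 < hi :=
      (PySem.Int.floordiv_lt_iff_lt_mul (by norm_num)).mpr (by omega)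
    omega

def bisect (frame : List (Int × Int × Int)) (item : Int × Int × Int) : Int :=
  bisectGo frame item 0 (frame.length : Int)

-- one iteration of B's loop body over state (frame, index); p = (i, x).
-- `del frame[_bisect(...)]`: the bumped triple is always in the sorted frame, so the
-- index is in range (otherwise Python's del would raise IndexError); and on an empty
-- frame with a true full-guard (only when limit = 0) Python raises IndexError at
-- frame[0] — those inputs are excluded by Pre_solution (the state is kept unchanged).
def bStep (limit : Int) (s : List (Int × Int × Int) × PySem.Dict Int (Int × Int))
    (p : Int × Int) : List (Int × Int × Int) × PySem.Dict Int (Int × Int) :=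
  match s.2.get? p.2 with
  | some co =>
      let f1 := match PySem.List.pop? s.1 (bisect s.1 (co.1, co.2, p.2)) with
        | some r => r.2
        | none => s.1
      (PySem.List.insert f1 (bisect f1 (co.1 + 1, co.2, p.2)) (co.1 + 1, co.2, p.2),
       s.2.insert p.2 (co.1 + 1, co.2))
  | none =>
      let s1 :=
        if (s.1.length : Int) = limit then
          match s.1 with
          | [] => s
          | t :: rest => (rest, s.2.erase t.2.2)
        else s
      (PySem.List.insert s1.1 (bisect s1.1 (1, p.1, p.2)) (1, p.1, p.2),
       s1.2.insert p.2 (1, p.1))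

def solution_alt (limit : Int) (recommend : List Int) : List Int :=
  let st := (PySem.List.enumerate recommend).foldl (bStep limit) ([], PySem.Dict.empty)
  PySem.List.sorted st.2.keys (fun k => k)

-- ===== PRECONDITION & SPEC =====
-- Pre_ excludes (a) limit = 0 with a nonempty recommend, where A's eviction scan over the
-- empty dict picks nothing and `del pictures[0]` raises KeyError, and (b) inputs in which
-- some value occurs more than 1000 times, where a frame count can reach A's sentinel 1001
-- and the scan can again pick nothing and raise KeyError; bound (b) is conservative (the
-- smallest input it excludes has 1001 equal entries, far outside BOJ 1713's n ≤ 1000).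
def Pre_solution (limit : Int) (recommend : List Int) : Prop :=
  (recommend = [] ∨ limit ≠ 0) ∧ ∀ x ∈ recommend, recommend.count x ≤ 1000
instance (limit : Int) (recommend : List Int) : Decidable (Pre_solution limit recommend) := by
  unfold Pre_solution; infer_instance

def pvWitness_solution : Int × List Int := (2, [1, 2, 3, 2, 1])

def Spec_solution (limit : Int) (recommend : List Int) (out : List Int) : Prop :=
  out = solution_alt limit recommend
instance (limit : Int) (recommend : List Int) (out : List Int) :
    Decidable (Spec_solution limit recommend out) := by unfold Spec_solution; infer_instance

-- ===== CLAIM (what is proved, stated in full; the proofs are below) =====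
def Claim_equal_solution : Prop := ∀ (limit : Int) (recommend : List Int),
  Dom_solution limit recommend → Pre_solution limit recommend →
  Spec_solution limit recommend (solution limit recommend)

-- ===== LEMMAS AND PROOFS =====

-- (count, order, name) view of a dict item (name, (count, order)).
def flipE (e : Int × (Int × Int)) : Int × Int × Int := (e.2.1, e.2.2, e.1)

-- Prop versions of the two strict orders the programs use: full tuple order, and the
-- (count, order) comparison of A's scan.
def P3 (a b : Int × Int × Int) : Prop :=
  a.1 < b.1 ∨ (a.1 = b.1 ∧ (a.2.1 < b.2.1 ∨ (a.2.1 = b.2.1 ∧ a.2.2 < b.2.2)))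

def LT2 (a b : Int × Int × Int) : Prop := a.1 < b.1 ∨ (a.1 = b.1 ∧ a.2.1 < b.2.1)

lemma tripLt_iff (a b : Int × Int × Int) : tripLt a b = true ↔ P3 a b := by
  obtain ⟨a1, a2, a3⟩ := a; obtain ⟨b1, b2, b3⟩ := b
  simp [tripLt, P3]

lemma P3_irrefl (a : Int × Int × Int) : ¬ P3 a a := by
  obtain ⟨a1, a2, a3⟩ := a; simp [P3]

lemma P3_trans {a b c : Int × Int × Int} (h1 : P3 a b) (h2 : P3 b c) : P3 a c := by
  obtain ⟨a1, a2, a3⟩ := a; obtain ⟨b1, b2, b3⟩ := b; obtain ⟨c1, c2, c3⟩ := c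
  simp only [P3] at *; omega

lemma P3_total_of_order_ne {a b : Int × Int × Int} (h : a.2.1 ≠ b.2.1) : P3 a b ∨ P3 b a := by
  obtain ⟨a1, a2, a3⟩ := a; obtain ⟨b1, b2, b3⟩ := b
  simp only [P3] at *; omega

lemma LT2_of_P3_of_order_ne {a b : Int × Int × Int} (h : P3 a b) (hne : a.2.1 ≠ b.2.1) :
    LT2 a b := by
  obtain ⟨a1, a2, a3⟩ := a; obtain ⟨b1, b2, b3⟩ := b
  simp only [P3, LT2] at *; omega

lemma LT2_irrefl (a : Int × Int × Int) : ¬ LT2 a a := by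
  obtain ⟨a1, a2, a3⟩ := a; simp [LT2]

lemma le2_trans {a b c : Int × Int × Int} (h1 : ¬ LT2 b a) (h2 : ¬ LT2 c b) : ¬ LT2 c a := by
  obtain ⟨a1, a2, a3⟩ := a; obtain ⟨b1, b2, b3⟩ := b; obtain ⟨c1, c2, c3⟩ := c
  simp only [LT2] at *; omega

-- ---- binary-search lemmas for B's sorted frame ----
lemma bisectGo_spec (l : List (Int × Int × Int)) (it : Int × Int × Int)
    (hsort : l.Pairwise P3) :
    ∀ (n : Nat) (lo hi : Int), (hi - lo).toNat = n →
      0 ≤ lo → lo ≤ hi → hi ≤ (l.length : Int) →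
      (∀ (k : Nat) (hk : k < l.length), (k : Int) < lo → P3 (l[k]'hk) it) →
      (∀ (k : Nat) (hk : k < l.length), hi ≤ (k : Int) → ¬ P3 (l[k]'hk) it) →
      ∃ j : Nat, bisectGo l it lo hi = (j : Int) ∧ j ≤ l.length ∧
        (∀ (k : Nat) (hk : k < l.length), k < j → P3 (l[k]'hk) it) ∧
        (∀ (k : Nat) (hk : k < l.length), j ≤ k → ¬ P3 (l[k]'hk) it) := by
  have hpw := List.pairwise_iff_getElem.mp hsort
  intro n
  induction n using Nat.strong_induction_on with
  | _ n ih =>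
    intro lo hi hn h0 hlh hhl hpre hpost
    rw [bisectGo]
    by_cases h : lo < hi
    · rw [dif_pos h]
      have hb := PySem.Int.floordiv_two_mid_bounds (le_of_lt h)
      have hltm : PySem.Int.floordiv (lo + hi) 2 < hi :=
        (PySem.Int.floordiv_lt_iff_lt_mul (by norm_num)).mpr (by omega)
      set m := PySem.Int.floordiv (lo + hi) 2 with hm
      have hmnat : m.toNat < l.length := by omega
      have hgd : PySem.List.pyGetD l m (0, 0, 0) = l[m.toNat]'hmnat := by
        rw [PySem.List.pyGetD_of_nonneg l _ (by omega)]
        exact List.getD_eq_getElem l _ hmnat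
      rw [hgd]
      by_cases hc : tripLt (l[m.toNat]'hmnat) it = true
      · rw [if_pos hc]
        have hP : P3 (l[m.toNat]'hmnat) it := (tripLt_iff _ _).mp hc
        refine ih (hi - (m + 1)).toNat (by omega) (m + 1) hi rfl (by omega) (by omega)
          hhl ?_ hpost
        intro k hk hklt
        rcases Nat.lt_or_ge k m.toNat with hkm | hkm
        · exact P3_trans (hpw k m.toNat hk hmnat hkm) hP
        · have hke : k = m.toNat := by omega
          subst hke; exact hP
      · rw [if_neg hc]
        have hnP : ¬ P3 (l[m.toNat]'hmnat) it := fun hp => hc ((tripLt_iff _ _).mpr hp)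
        refine ih (m - lo).toNat (by omega) lo m rfl h0 (by omega) (by omega) hpre ?_
        intro k hk hkge
        rcases Nat.lt_or_ge m.toNat k with hkm | hkm
        · intro hp
          exact hnP (P3_trans (hpw m.toNat k hmnat hk hkm) hp)
        · have hke : k = m.toNat := by omega
          subst hke; exact hnP
    · rw [dif_neg h]
      refine ⟨lo.toNat, by omega, by omega, ?_, ?_⟩
      · intro k hk hkj
        exact hpre k hk (by omega)
      · intro k hk hkj
        exact hpost k hk (by omega)

lemma bisect_split (l : List (Int × Int × Int)) (it : Int × Int × Int)
    (hsort : l.Pairwise P3) :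
    ∃ j : Nat, bisect l it = (j : Int) ∧ j ≤ l.length ∧
      (∀ u ∈ l.take j, P3 u it) ∧ (∀ u ∈ l.drop j, ¬ P3 u it) := by
  obtain ⟨j, hj, hjle, hpre, hpost⟩ :=
    bisectGo_spec l it hsort ((l.length : Int) - 0).toNat 0 (l.length : Int) rfl
      le_rfl (by omega) le_rfl
      (fun k hk hklt => absurd hklt (by omega))
      (fun k hk hge => absurd hge (by omega))
  refine ⟨j, hj, hjle, ?_, ?_⟩
  · intro u hu
    obtain ⟨k, hk, rfl⟩ := List.mem_iff_getElem.mp hu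
    have hk' := hk
    rw [List.length_take] at hk'
    rw [List.getElem_take]
    exact hpre k (by omega) (by omega)
  · intro u hu
    obtain ⟨k, hk, rfl⟩ := List.mem_iff_getElem.mp hu
    have hk' := hk
    rw [List.length_drop] at hk'
    rw [List.getElem_drop]
    exact hpost (j + k) (by omega) (by omega)

lemma bisect_insert (l : List (Int × Int × Int)) (it : Int × Int × Int)
    (hsort : l.Pairwise P3) (hcmp : ∀ u ∈ l, P3 it u ∨ P3 u it) :
    (PySem.List.insert l (bisect l it) it).Perm (it :: l) ∧
      (PySem.List.insert l (bisect l it) it).Pairwise P3 := by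
  obtain ⟨j, hj, hjle, htake, hdrop⟩ := bisect_split l it hsort
  rw [hj, PySem.List.insert_natCast l j it hjle]
  have hdropP : ∀ u ∈ l.drop j, P3 it u := by
    intro u hu
    rcases hcmp u ((List.drop_sublist j l).subset hu) with h | h
    · exact h
    · exact absurd h (hdrop u hu)
  constructor
  · refine List.perm_middle.trans ?_
    rw [List.take_append_drop]
  · rw [List.pairwise_append]
    refine ⟨List.Pairwise.sublist (List.take_sublist j l) hsort, ?_, ?_⟩
    · exact List.Pairwise.cons hdropP (List.Pairwise.sublist (List.drop_sublist j l) hsort)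
    · intro a ha b hb
      rcases List.mem_cons.mp hb with rfl | hb'
      · exact htake a ha
      · exact P3_trans (htake a ha) (hdropP b hb')

lemma bisect_delete (l : List (Int × Int × Int)) (it : Int × Int × Int)
    (hsort : l.Pairwise P3) (hmem : it ∈ l) :
    ∃ F1 : List (Int × Int × Int), PySem.List.pop? l (bisect l it) = some (it, F1) ∧
      l.Perm (it :: F1) ∧ F1.Sublist l := by
  obtain ⟨j, hj, hjle, htake, hdrop⟩ := bisect_split l it hsort
  have hmem' : it ∈ l.drop j := by
    have hmem2 : it ∈ l.take j ++ l.drop j := by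
      rw [List.take_append_drop]; exact hmem
    rcases List.mem_append.mp hmem2 with h | h
    · exact absurd (htake it h) (P3_irrefl it)
    · exact h
  obtain ⟨t', ht'⟩ : ∃ t', l.drop j = it :: t' := by
    cases hd : l.drop j with
    | nil => rw [hd] at hmem'; simp at hmem'
    | cons u0 t' =>
        rw [hd] at hmem'
        rcases List.mem_cons.mp hmem' with rfl | hin
        · exact ⟨t', rfl⟩
        · have hpwd : (u0 :: t').Pairwise P3 := by
            rw [← hd]; exact List.Pairwise.sublist (List.drop_sublist j l) hsort
          have hP : P3 u0 it := List.rel_of_pairwise_cons hpwd hin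
          exact absurd hP (hdrop u0 (by rw [hd]; exact List.mem_cons_self))
  have hjlt : j < l.length := by
    have hlen : (l.drop j).length = l.length - j := List.length_drop
    rw [ht'] at hlen
    simp only [List.length_cons] at hlen
    omega
  have hljt : l[j]'hjlt = it := by
    have h0 : 0 < (l.drop j).length := by rw [ht']; simp
    have h1 : (l.drop j)[0]'h0 = l[j + 0]'(by omega) := List.getElem_drop
    have h2 : (l.drop j)[0]'h0 = it := by
      have := List.getElem_of_eq ht' (by rw [ht']; simp : (0 : Nat) < (l.drop j).length)
      simpa using this
    rw [h2] at h1
    have h3 : l[j + 0]'(by omega) = l[j]'hjlt := by simp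
    rw [← h3, ← h1]
  refine ⟨l.eraseIdx j, ?_, ?_, List.eraseIdx_sublist l j⟩
  · rw [hj]
    rw [PySem.List.pop?_natCast l j hjlt, hljt]
  · have he : l.eraseIdx j = l.take j ++ t' := by
      rw [List.eraseIdx_eq_take_drop_succ]
      congr 1
      rw [← List.drop_drop, ht']
      simp
    rw [he]
    have hform : l.Perm (l.take j ++ it :: t') := by
      rw [← ht', List.take_append_drop]
    exact hform.trans List.perm_middle

-- ---- the min-fold of A's eviction scan ----
def gmin (acc u : Int × Int × Int) : Int × Int × Int :=
  if u.1 < acc.1 ∨ (u.1 = acc.1 ∧ u.2.1 < acc.2.1) then u else acc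

lemma gmin_le_init (z x : Int × Int × Int) : ¬ LT2 z (gmin z x) := by
  unfold gmin; split_ifs with h
  · obtain ⟨a1, a2, a3⟩ := x; obtain ⟨b1, b2, b3⟩ := z
    simp only [LT2] at *; omega
  · exact LT2_irrefl z

lemma gmin_le_arg (z x : Int × Int × Int) : ¬ LT2 x (gmin z x) := by
  unfold gmin; split_ifs with h
  · exact LT2_irrefl x
  · exact fun h' => h (by exact h')

lemma fold_gmin_mem : ∀ (l : List (Int × Int × Int)) (z : Int × Int × Int),
    l.foldl gmin z = z ∨ l.foldl gmin z ∈ l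
  | [], z => Or.inl rfl
  | x :: r, z => by
      rcases fold_gmin_mem r (gmin z x) with h | h
      · simp only [List.foldl_cons, h]
        unfold gmin; split_ifs with hc
        · exact Or.inr (by simp)
        · exact Or.inl rfl
      · exact Or.inr (by simp [List.foldl_cons, h])

lemma fold_gmin_le_init : ∀ (l : List (Int × Int × Int)) (z : Int × Int × Int),
    ¬ LT2 z (l.foldl gmin z)
  | [], z => LT2_irrefl z
  | x :: r, z => by
      simp only [List.foldl_cons]
      exact le2_trans (fold_gmin_le_init r (gmin z x)) (gmin_le_init z x)

lemma fold_gmin_min : ∀ (l : List (Int × Int × Int)) (z u : Int × Int × Int), u ∈ l →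
    ¬ LT2 u (l.foldl gmin z)
  | [], z, u, hu => absurd hu (by simp)
  | x :: r, z, u, hu => by
      simp only [List.foldl_cons]
      rcases List.mem_cons.mp hu with rfl | hu
      · exact le2_trans (fold_gmin_le_init r (gmin z u)) (gmin_le_arg z u)
      · exact fold_gmin_min r (gmin z x) u hu

-- aScan returns the head of any P3-sorted permutation of the (count, order, name) triples.
lemma aScan_eq (items : List (Int × (Int × Int))) (t0 : Int × Int × Int)
    (rest : List (Int × Int × Int))
    (hperm : (items.map flipE).Perm (t0 :: rest))
    (hc : ∀ e ∈ items, e.2.1 ≤ 1000)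
    (hpw : (t0 :: rest).Pairwise P3)
    (hord : (items.map (fun e => e.2.2)).Nodup) :
    aScan items = t0 := by
  have hfold : aScan items = (items.map flipE).foldl gmin (1001, 1001, 0) := by
    rw [List.foldl_map]; rfl
  set l := items.map flipE with hl
  have hordl : (l.map (fun u => u.2.1)).Nodup := by
    have : l.map (fun u => u.2.1) = items.map (fun e => e.2.2) := by
      rw [hl, List.map_map]; rfl
    rw [this]; exact hord
  have ht0 : t0 ∈ l := hperm.mem_iff.mpr (by simp)
  have hc' : ∀ u ∈ l, u.1 ≤ 1000 := by
    intro u hu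
    obtain ⟨e, he, rfl⟩ := List.mem_map.mp hu
    exact hc e he
  have hlt0z : LT2 t0 (1001, 1001, 0) := Or.inl (by have := hc' t0 ht0; omega)
  rw [hfold]
  rcases fold_gmin_mem l (1001, 1001, 0) with h | h
  · exact absurd hlt0z (h ▸ fold_gmin_min l (1001, 1001, 0) t0 ht0)
  · rcases List.mem_cons.mp (hperm.mem_iff.mp h) with h' | h'
    · exact h'
    · exfalso
      have hp3 : P3 t0 (l.foldl gmin (1001, 1001, 0)) := List.rel_of_pairwise_cons hpw h'
      have hne : t0.2.1 ≠ (l.foldl gmin (1001, 1001, 0)).2.1 := by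
        intro heq
        have := List.inj_on_of_nodup_map hordl ht0 h heq
        rw [this] at hp3
        exact P3_irrefl _ hp3
      exact fold_gmin_min l (1001, 1001, 0) t0 ht0 (LT2_of_P3_of_order_ne hp3 hne)

-- ---- association-list splitting (raw item lists, keys unique) ----
lemma split_of_mem_nodup : ∀ {l : List (Int × (Int × Int))} {x : Int} {v : Int × Int},
    (x, v) ∈ l → (l.map (fun p => p.1)).Nodup →
    l.Perm ((x, v) :: l.filter (fun p => !(p.1 == x)))
  | [], x, v, hmem, _ => absurd hmem (by simp)
  | a :: l', x, v, hmem, hnd => by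
      simp only [List.map_cons, List.nodup_cons] at hnd
      obtain ⟨hax, hnd'⟩ := hnd
      rcases List.mem_cons.mp hmem with rfl | hmem'
      · have hfl : l'.filter (fun p => !(p.1 == x)) = l' := by
          rw [List.filter_eq_self]
          intro p hp
          simp only [Bool.not_eq_eq_eq_not, Bool.not_true, beq_eq_false_iff_ne]
          intro hpx
          exact hax (List.mem_map.mpr ⟨p, hp, hpx⟩)
        have hstep : List.filter (fun p => !(p.1 == x)) ((x, v) :: l') = l' := by
          simp only [List.filter_cons]
          rw [show (!((x, v).1 == x)) = false by simp]
          simpa using hfl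
        rw [hstep]
      · have haxne : a.1 ≠ x := by
          intro h
          exact hax (h ▸ List.mem_map.mpr ⟨(x, v), hmem', rfl⟩)
        have ih := split_of_mem_nodup hmem' hnd'
        have hstep : List.filter (fun p => !(p.1 == x)) (a :: l') =
            a :: List.filter (fun p => !(p.1 == x)) l' := by
          simp only [List.filter_cons]
          rw [show (!(a.1 == x)) = true by simp [haxne]]
          simp
        rw [hstep]
        exact ((ih.cons a).trans (List.Perm.swap (x, v) a _))

lemma replace_of_mem_nodup : ∀ {l : List (Int × (Int × Int))} {x : Int} {v : Int × Int},
    (x, v) ∈ l → (l.map (fun p => p.1)).Nodup → ∀ (w : Int × Int),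
    (l.map (fun p => if p.1 == x then (x, w) else p)).Perm
      ((x, w) :: l.filter (fun p => !(p.1 == x)))
  | [], x, v, hmem, _, w => absurd hmem (by simp)
  | a :: l', x, v, hmem, hnd, w => by
      simp only [List.map_cons, List.nodup_cons] at hnd
      obtain ⟨hax, hnd'⟩ := hnd
      rcases List.mem_cons.mp hmem with rfl | hmem'
      · have hnox : ∀ p ∈ l', (p.1 == x) = false := by
          intro p hp
          simp only [beq_eq_false_iff_ne]
          intro hpx
          exact hax (List.mem_map.mpr ⟨p, hp, hpx⟩)
        have hmap : l'.map (fun p => if p.1 == x then (x, w) else p) = l' := by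
          conv_rhs => rw [← List.map_id l']
          refine List.map_congr_left ?_
          intro p hp
          simp [hnox p hp]
        have hfl : l'.filter (fun p => !(p.1 == x)) = l' := by
          rw [List.filter_eq_self]
          intro p hp
          simp [hnox p hp]
        have hstep1 : ((x, v) :: l').map (fun p => if p.1 == x then (x, w) else p) =
            (x, w) :: l' := by
          simp only [List.map_cons]
          rw [show (((x, v).1 == x) = true) by simp]
          simpa using hmap
        have hstep2 : List.filter (fun p => !(p.1 == x)) ((x, v) :: l') = l' := by
          simp only [List.filter_cons]
          rw [show (!((x, v).1 == x)) = false by simp]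
          simpa using hfl
        rw [hstep1, hstep2]
      · have haxne : a.1 ≠ x := by
          intro h
          exact hax (h ▸ List.mem_map.mpr ⟨(x, v), hmem', rfl⟩)
        have ih := replace_of_mem_nodup hmem' hnd' w
        have hstep1 : ((a :: l').map (fun p => if p.1 == x then (x, w) else p)) =
            a :: l'.map (fun p => if p.1 == x then (x, w) else p) := by
          simp only [List.map_cons]
          rw [show ((a.1 == x) = false) by simp [haxne]]
          simp
        have hstep2 : List.filter (fun p => !(p.1 == x)) (a :: l') =
            a :: List.filter (fun p => !(p.1 == x)) l' := by
          simp only [List.filter_cons]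
          rw [show (!(a.1 == x)) = true by simp [haxne]]
          simp
        rw [hstep1, hstep2]
        exact ((ih.cons a).trans (List.Perm.swap (x, w) a _))

-- ---- the loop invariant ----
def LoopInv (i : Int) (todo : List Int) (d : PySem.Dict Int (Int × Int))
    (frame : List (Int × Int × Int)) : Prop :=
  d.keys.Nodup ∧
  (d.items.map (fun e => e.2.2)).Nodup ∧
  (∀ e ∈ d.items, e.2.2 < i) ∧
  (∀ e ∈ d.items, 1 ≤ e.2.1 ∧ e.2.1 + (todo.count e.1 : Int) ≤ 1000) ∧
  frame.Perm (d.items.map flipE) ∧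
  frame.Pairwise P3

-- names of the frame triples are the dict keys (as multisets)
lemma map_flip_names (items : List (Int × (Int × Int))) :
    (items.map flipE).map (fun u => u.2.2) = items.map (fun p => p.1) := by
  rw [List.map_map]; rfl

-- inserting a fresh name x at time i preserves the invariant
lemma insert_new_inv (i x : Int) (t : List Int) (d : PySem.Dict Int (Int × Int))
    (frame : List (Int × Int × Int))
    (hnd : d.keys.Nodup)
    (hordnd : (d.items.map (fun e => e.2.2)).Nodup)
    (hordlt : ∀ e ∈ d.items, e.2.2 < i)
    (hcnt : ∀ e ∈ d.items, 1 ≤ e.2.1 ∧ e.2.1 + (t.count e.1 : Int) ≤ 1000)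
    (hperm : frame.Perm (d.items.map flipE))
    (hpw : frame.Pairwise P3)
    (hx : d.get? x = none)
    (hxc : (t.count x : Int) + 1 ≤ 1000) :
    LoopInv (i + 1) t (d.insert x (1, i))
      (PySem.List.insert frame (bisect frame (1, i, x)) (1, i, x)) := by
  have hcont : d.contains x = false := (PySem.Dict.get?_eq_none_iff_contains d x).mp hx
  have hcmp' : ∀ u ∈ frame, P3 (1, i, x) u ∨ P3 u (1, i, x) := by
    intro u hu
    obtain ⟨e, he, rfl⟩ := List.mem_map.mp (hperm.mem_iff.mp hu)
    have := hordlt e he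
    refine P3_total_of_order_ne ?_
    show (1, i, x).2.1 ≠ (flipE e).2.1
    simp only [flipE]
    omega
  have hins := bisect_insert frame (1, i, x) hpw hcmp'
  have hitems : (d.insert x (1, i)).items = d.items ++ [(x, (1, i))] :=
    PySem.Dict.items_insert_of_not_contains d _ hcont
  refine ⟨PySem.Dict.nodup_keys_insert d x (1, i) hnd, ?_, ?_, ?_, ?_, ?_⟩
  · rw [hitems]
    simp only [List.map_append, List.map_cons, List.map_nil]
    rw [List.nodup_append]
    refine ⟨hordnd, by simp, ?_⟩
    intro o ho b hb
    obtain ⟨e, he, rfl⟩ := List.mem_map.mp ho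
    have := hordlt e he
    simp only [List.mem_singleton] at hb
    omega
  · intro e he
    rw [hitems] at he
    rcases List.mem_append.mp he with he | he
    · have := hordlt e he; omega
    · simp only [List.mem_singleton] at he
      subst he
      show i < i + 1
      omega
  · intro e he
    rw [hitems] at he
    rcases List.mem_append.mp he with he | he
    · exact hcnt e he
    · simp only [List.mem_singleton] at he
      subst he
      refine ⟨by simp, ?_⟩
      show (1 : Int) + ((t.count x : Nat) : Int) ≤ 1000
      omega
  · rw [hitems]
    simp only [List.map_append, List.map_cons, List.map_nil]
    refine hins.1.trans ?_
    refine List.Perm.trans ?_ (List.perm_append_singleton _ _).symm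
    exact hperm.cons _
  · exact hins.2

lemma step_inv (limit i x : Int) (t : List Int) (d : PySem.Dict Int (Int × Int))
    (frame : List (Int × Int × Int)) (hl : limit ≠ 0)
    (hsuf : ∀ y, ((x :: t).count y : Int) ≤ 1000)
    (hInv : LoopInv i (x :: t) d frame) :
    (bStep limit (frame, d) (i, x)).2 = aStep limit d (i, x) ∧
      LoopInv (i + 1) t (aStep limit d (i, x)) (bStep limit (frame, d) (i, x)).1 := by
  obtain ⟨hnd, hordnd, hordlt, hcnt, hperm, hpw⟩ := hInv
  have hndl : (d.items.map (fun p => p.1)).Nodup := hnd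
  have hcount_tail : ∀ (y : Int), (t.count y : Int) ≤ ((x :: t).count y : Int) := by
    intro y
    have : t.count y ≤ (x :: t).count y := by
      rw [List.count_cons]; omega
    exact_mod_cast this
  cases hget : d.get? x with
  | some co =>
      obtain ⟨c0, o0⟩ := co
      have hmem : (x, (c0, o0)) ∈ d.items := PySem.Dict.mem_items_of_get?_eq_some d hget
      have hcont : d.contains x = true := by
        rw [PySem.Dict.contains_eq_isSome_get?, hget]; rfl
      have hitems : (d.insert x (c0 + 1, o0)).items =
          d.items.map (fun p => if p.1 == x then (x, (c0 + 1, o0)) else p) :=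
        PySem.Dict.items_insert_of_contains d _ hcont
      have hsplit := split_of_mem_nodup hmem hndl
      have hrepl := replace_of_mem_nodup hmem hndl (c0 + 1, o0)
      have holdmem : (c0, o0, x) ∈ frame :=
        hperm.mem_iff.mpr (List.mem_map.mpr ⟨(x, (c0, o0)), hmem, rfl⟩)
      obtain ⟨F1, hpop, hpermF1, hsubF1⟩ := bisect_delete frame (c0, o0, x) hpw holdmem
      have hF1sort : F1.Pairwise P3 := List.Pairwise.sublist hsubF1 hpw
      have hnames : (frame.map (fun u => u.2.2)).Nodup := by
        have h1 := hperm.map (fun u => u.2.2)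
        rw [map_flip_names] at h1
        exact h1.nodup_iff.mpr hnd
      have hframe_nodup : frame.Nodup := hnames.of_map
      have holdnot : (c0, o0, x) ∉ F1 := by
        have h2 : ((c0, o0, x) :: F1).Nodup := hpermF1.nodup_iff.mp hframe_nodup
        exact (List.nodup_cons.mp h2).1
      have hcmp' : ∀ u ∈ F1, P3 (c0 + 1, o0, x) u ∨ P3 u (c0 + 1, o0, x) := by
        intro u hu
        obtain ⟨e, he, rfl⟩ := List.mem_map.mp (hperm.mem_iff.mp (hsubF1.subset hu))
        refine P3_total_of_order_ne ?_
        show (c0 + 1, o0, x).2.1 ≠ (flipE e).2.1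
        simp only [flipE]
        intro hoeq
        have heq : (x, (c0, o0)) = e :=
          List.inj_on_of_nodup_map (f := fun e => e.2.2) hordnd hmem he (by simpa using hoeq)
        rw [← heq] at hu
        exact holdnot (by simpa [flipE] using hu)
      have hins := bisect_insert F1 (c0 + 1, o0, x) hF1sort hcmp'
      have hstep : aStep limit d (i, x) = d.insert x (c0 + 1, o0) := by
        simp [aStep, hget]
      have hbstep : bStep limit (frame, d) (i, x) =
          (PySem.List.insert F1 (bisect F1 (c0 + 1, o0, x)) (c0 + 1, o0, x),
            d.insert x (c0 + 1, o0)) := by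
        simp [bStep, hget, hpop]
      rw [hstep, hbstep]
      refine ⟨rfl, PySem.Dict.nodup_keys_insert d x (c0 + 1, o0) hnd, ?_, ?_, ?_, ?_, ?_⟩
      · -- orders stay a nodup multiset
        have h1 : ((d.insert x (c0 + 1, o0)).items.map (fun e => e.2.2)).Perm
            (o0 :: (d.items.filter (fun p => !(p.1 == x))).map (fun e => e.2.2)) := by
          rw [hitems]
          simpa using hrepl.map (fun e => e.2.2)
        have h2 : (d.items.map (fun e => e.2.2)).Perm
            (o0 :: (d.items.filter (fun p => !(p.1 == x))).map (fun e => e.2.2)) := by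
          simpa using hsplit.map (fun e => e.2.2)
        exact h1.nodup_iff.mpr (h2.nodup_iff.mp hordnd)
      · intro e he
        rw [hitems] at he
        rcases List.mem_cons.mp (hrepl.mem_iff.mp he) with rfl | he'
        · have h : o0 < i := hordlt _ hmem
          show o0 < i + 1
          omega
        · have := hordlt e (List.mem_of_mem_filter he')
          omega
      · intro e he
        rw [hitems] at he
        rcases List.mem_cons.mp (hrepl.mem_iff.mp he) with rfl | he'
        · have h1 : (1 : Int) ≤ c0 := (hcnt _ hmem).1
          have h2 : c0 + (((x :: t).count x : Nat) : Int) ≤ 1000 := (hcnt _ hmem).2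
          have hcc : (((x :: t).count x : Nat) : Int) = ((t.count x : Nat) : Int) + 1 := by
            rw [List.count_cons_self]; push_cast; ring
          refine ⟨?_, ?_⟩
          · show (1 : Int) ≤ c0 + 1
            omega
          · show c0 + 1 + ((t.count x : Nat) : Int) ≤ 1000
            omega
        · have h := hcnt e (List.mem_of_mem_filter he')
          have := hcount_tail e.1
          exact ⟨h.1, by omega⟩
      · -- frame permutation
        rw [hitems]
        refine hins.1.trans ?_
        have hF1R : F1.Perm ((d.items.filter (fun p => !(p.1 == x))).map flipE) := by
          have hchain : ((c0, o0, x) :: F1).Perm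
              ((c0, o0, x) :: (d.items.filter (fun p => !(p.1 == x))).map flipE) := by
            refine hpermF1.symm.trans (hperm.trans ?_)
            have h3 := hsplit.map flipE
            simpa [flipE] using h3
          exact hchain.cons_inv
        have hfin := (hrepl.map flipE).symm
        simp only [List.map_cons] at hfin
        exact (hF1R.cons (c0 + 1, o0, x)).trans hfin
      · -- frame sortedness
        exact hins.2
  | none =>
      have hxkeys : x ∉ d.keys := (PySem.Dict.get?_eq_none_iff_not_mem_keys d x).mp hget
      have hlen : (frame.length : Int) = (d.size : Int) := by
        have := hperm.length_eq
        simp only [List.length_map] at this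
        rw [this]; rfl
      have hxc : (t.count x : Int) + 1 ≤ 1000 := by
        have := hsuf x
        have hcc : ((x :: t).count x : Int) = (t.count x : Int) + 1 := by
          rw [List.count_cons_self]; push_cast; ring
        omega
      by_cases hfull : (d.size : Int) = limit
      · -- eviction
        have hframe_ne : frame ≠ [] := by
          intro hf
          rw [hf] at hlen
          simp at hlen
          exact hl (by omega)
        obtain ⟨t0, rest, rfl⟩ : ∃ t0 rest, frame = t0 :: rest := by
          cases frame with
          | nil => exact absurd rfl hframe_ne
          | cons a b => exact ⟨a, b, rfl⟩
        have hcle : ∀ e ∈ d.items, e.2.1 ≤ 1000 := by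
          intro e he
          have h1 : e.2.1 + (((x :: t).count e.1 : Nat) : Int) ≤ 1000 := (hcnt e he).2
          have h0 : (0 : Int) ≤ (((x :: t).count e.1 : Nat) : Int) := Int.natCast_nonneg _
          omega
        have hscan : aScan d.items = t0 :=
          aScan_eq d.items t0 rest hperm.symm hcle hpw hordnd
        have hstep : aStep limit d (i, x) = (d.erase t0.2.2).insert x (1, i) := by
          simp only [aStep, hget, hfull, hscan, if_true]
        have hguardB : (((t0 :: rest : List (Int × Int × Int)).length : Int) = limit) := by
          rw [hlen]; exact hfull
        have hg2 : ((rest.length : Int) + 1) = limit := by simpa using hguardB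
        have hbstep' : bStep limit (t0 :: rest, d) (i, x) =
            (PySem.List.insert rest (bisect rest (1, i, x)) (1, i, x),
              (d.erase t0.2.2).insert x (1, i)) := by
          simp [bStep, hget, hg2]
        rw [hstep, hbstep']
        -- facts about the erased dict E
        have hEitems : (d.erase t0.2.2).items = d.items.filter (fun p => !(p.1 == t0.2.2)) := rfl
        have hEkeys_sub : (d.erase t0.2.2).keys.Sublist d.keys := by
          show ((d.items.filter _).map (fun p => p.1)).Sublist (d.items.map (fun p => p.1))
          exact List.Sublist.map _ List.filter_sublist
        have hEnd : (d.erase t0.2.2).keys.Nodup := List.Nodup.sublist hEkeys_sub hnd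
        have hEord_sub : ((d.erase t0.2.2).items.map (fun e => e.2.2)).Sublist
            (d.items.map (fun e => e.2.2)) := by
          rw [hEitems]; exact List.Sublist.map _ List.filter_sublist
        have hEordnd := List.Nodup.sublist hEord_sub hordnd
        have hEx : (d.erase t0.2.2).get? x = none := by
          rw [PySem.Dict.get?_eq_none_iff_not_mem_keys]
          intro hmem
          exact hxkeys (hEkeys_sub.subset hmem)
        -- rest is exactly the triples of E
        have hnames_nodup : ((t0 :: rest).map (fun u => u.2.2)).Nodup := by
          have h1 := hperm.map (fun u => u.2.2)
          rw [map_flip_names] at h1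
          exact h1.nodup_iff.mpr hnd
        have hrest_names : ∀ u ∈ rest, u.2.2 ≠ t0.2.2 := by
          simp only [List.map_cons, List.nodup_cons] at hnames_nodup
          intro u hu hcontra
          exact hnames_nodup.1 (List.mem_map.mpr ⟨u, hu, hcontra⟩)
        have hrestE : rest.Perm ((d.erase t0.2.2).items.map flipE) := by
          have h2 : ((d.erase t0.2.2).items.map flipE) =
              (d.items.map flipE).filter (fun u => !(u.2.2 == t0.2.2)) := by
            rw [hEitems, List.filter_map]; rfl
          rw [h2]
          have h3 := (hperm.symm).filter (fun u => !(u.2.2 == t0.2.2))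
          have h4 : (t0 :: rest).filter (fun u => !(u.2.2 == t0.2.2)) = rest := by
            simp only [List.filter_cons]
            rw [show (!(t0.2.2 == t0.2.2)) = false by simp]
            simp only [Bool.false_eq_true, if_false]
            rw [List.filter_eq_self]
            intro u hu
            simpa using hrest_names u hu
          rw [h4] at h3
          exact h3.symm
        have hpw_rest : rest.Pairwise P3 := by
          rcases hpw with _ | ⟨_, h⟩; exact h
        refine ⟨rfl, ?_⟩
        exact insert_new_inv i x t (d.erase t0.2.2) rest hEnd hEordnd
          (fun e he => hordlt e (List.mem_of_mem_filter (hEitems ▸ he)))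
          (fun e he =>
            have h := hcnt e (List.mem_of_mem_filter (hEitems ▸ he))
            ⟨h.1, by have := hcount_tail e.1; omega⟩)
          hrestE hpw_rest hEx hxc
      · -- no eviction
        have hguardB : ¬ ((frame.length : Int) = limit) := by rw [hlen]; exact hfull
        have hstep : aStep limit d (i, x) = d.insert x (1, i) := by
          simp [aStep, hget, hfull]
        have hbstep : bStep limit (frame, d) (i, x) =
            (PySem.List.insert frame (bisect frame (1, i, x)) (1, i, x),
              d.insert x (1, i)) := by
          simp [bStep, hget, hguardB]
        rw [hstep, hbstep]
        refine ⟨rfl, ?_⟩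
        exact insert_new_inv i x t d frame hnd hordnd hordlt
          (fun e he => ⟨(hcnt e he).1, by have := hcount_tail e.1; have := (hcnt e he).2; omega⟩)
          hperm hpw hget hxc

lemma loop_inv : ∀ (todo : List Int) (limit i : Int) (d : PySem.Dict Int (Int × Int))
    (frame : List (Int × Int × Int)),
    (todo ≠ [] → limit ≠ 0) → (∀ y, ((todo.count y : Int)) ≤ 1000) →
    LoopInv i todo d frame →
    ((PySem.List.enumerate todo i).foldl (bStep limit) (frame, d)).2 =
      (PySem.List.enumerate todo i).foldl (aStep limit) d := by
  intro todo
  induction todo with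
  | nil => intro limit i d frame _ _ _; simp [PySem.List.enumerate]
  | cons x t ih =>
      intro limit i d frame hlim hcnt hInv
      have hl : limit ≠ 0 := hlim (by simp)
      obtain ⟨heq, hInv'⟩ := step_inv limit i x t d frame hl hcnt hInv
      have hrw : PySem.List.enumerate (x :: t) i = (i, x) :: PySem.List.enumerate t (i + 1) := by
        simp [PySem.List.enumerate]
      rw [hrw]
      simp only [List.foldl_cons]
      have ih' := ih limit (i + 1) (aStep limit d (i, x)) ((bStep limit (frame, d) (i, x)).1)
        (fun _ => hl)
        (fun y => le_trans (by exact_mod_cast (by rw [List.count_cons]; omega :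
            t.count y ≤ (x :: t).count y)) (hcnt y))
        hInv'
      have heta : ((bStep limit (frame, d) (i, x)).1, (bStep limit (frame, d) (i, x)).2) =
          bStep limit (frame, d) (i, x) := rfl
      rw [← heq] at ih' ⊢
      rw [heta] at ih'
      exact ih'

-- ===== VERDICT (by name: the statement is the Claim_ definition above) =====
theorem solution_spec : Claim_equal_solution := by
  intro limit recommend _ hpre
  unfold Spec_solution
  have hA : solution limit recommend =
      PySem.List.sorted ((PySem.List.enumerate recommend).foldl (aStep limit)
        PySem.Dict.empty).keys (fun k => k) := rfl
  have hB : solution_alt limit recommend =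
      PySem.List.sorted ((PySem.List.enumerate recommend).foldl (bStep limit)
        ([], PySem.Dict.empty)).2.keys (fun k => k) := rfl
  have h := loop_inv recommend limit 0 PySem.Dict.empty []
    (fun hne => hpre.1.resolve_left hne)
    (fun y => by
      by_cases hy : y ∈ recommend
      · exact_mod_cast hpre.2 y hy
      · simp [List.count_eq_zero_of_not_mem hy])
    (by
      refine ⟨?_, ?_, ?_, ?_, ?_, ?_⟩ <;>
        simp [PySem.Dict.empty, PySem.Dict.keys])
  rw [hA, hB, h]
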